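-- pv_equiv track=rewrite | github.com/UYildiz12/ActionRep | Multiarr_58vids/Workingexample_orginal32vids.py | get_new_combinations
-- ===== SOURCE A (Python) =====
-- import itertools
--
-- def get_combinations(my_list, batch_size):
--     two_item_combinations = set(itertools.combinations(my_list, 2))
--     batch_item_combinations = list(itertools.combinations(my_list, batch_size))
--
--     return two_item_combinations, batch_item_combinations
--
-- def get_new_combinations(my_list, batch_size):
--     two_item_combinations, batch_item_combinations = get_combinations(my_list, batch_size)
--     new_combinations = []
--     while two_item_combinations:
--         batch_item_combinations.sort(key=lambda x: len(set(itertools.combinations(x, 2)) & two_item_combinations), reverse=True)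
--         for combination in batch_item_combinations:
--             sub_combinations = set(itertools.combinations(combination, 2))
--             if sub_combinations & two_item_combinations:
--                 new_combinations.append(combination)
--                 two_item_combinations -= sub_combinations
--                 break
--     return new_combinations
-- ===== SOURCE B (Python) =====
-- import itertools
--
-- def _pairs(t):
--     return set(itertools.combinations(t, 2))
--
-- def get_new_combinations(my_list, batch_size):
--     pairs_left = set(itertools.combinations(my_list, 2))
--     batches = list(itertools.combinations(my_list, batch_size))
--     covering = {}  # pair -> distinct batches whose pair set contains it
--     counts = {}    # batch -> number of its pairs still in pairs_left
--     for b in batches: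
--         if b not in counts:
--             ps = _pairs(b)
--             counts[b] = len(ps)  # every pair of b is initially in pairs_left
--             for p in ps:
--                 covering.setdefault(p, []).append(b)
--     result = []
--     while pairs_left:
--         batches.sort(key=counts.__getitem__, reverse=True)
--         for b in batches:
--             if counts[b]:
--                 result.append(b)
--                 removed = _pairs(b) & pairs_left
--                 pairs_left -= removed
--                 for p in removed:
--                     for c in covering[p]:
--                         counts[c] -= 1
--                 break
--     return result
-- ===== Notes on version B (the rewrite author's own statement) =====
-- stated objective: alternative
-- what changed: Instead of recomputing every batch's covered-pair intersection and sort key from scratch on every round of the greedy loop, B builds in one pass each distinct batch's pair set size and a pair-to-batches index, maintains exact coverage counts decremented incrementally as pairs are removed, and re-sorts by the stored counts, picking the first batch with a nonzero count.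
import Mathlib
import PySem

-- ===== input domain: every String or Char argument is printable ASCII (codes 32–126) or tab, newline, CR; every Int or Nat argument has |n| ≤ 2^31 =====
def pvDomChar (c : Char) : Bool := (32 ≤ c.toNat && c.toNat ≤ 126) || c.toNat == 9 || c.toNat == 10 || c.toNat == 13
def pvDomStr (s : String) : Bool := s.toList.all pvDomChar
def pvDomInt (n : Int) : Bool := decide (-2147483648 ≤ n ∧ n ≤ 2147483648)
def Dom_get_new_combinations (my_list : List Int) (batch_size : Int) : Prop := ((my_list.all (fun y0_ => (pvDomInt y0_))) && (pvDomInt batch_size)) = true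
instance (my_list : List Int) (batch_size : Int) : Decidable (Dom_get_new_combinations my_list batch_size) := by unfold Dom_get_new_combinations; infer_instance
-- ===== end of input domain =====

-- B replaces A's per-round recomputation of every batch's covered-pair intersection by a one-pass
-- pair→batches index and incrementally maintained coverage counts, re-sorting by the stored counts
-- (an alternative algorithm; a timing run could not confirm a measurable speed-up at its sizes).
-- Python A sorts `batch_item_combinations` in place; B performs the same in-place sort of `batches`.

-- ===== PORT A =====
-- set(itertools.combinations(x, 2)) — the pair set of a tuple (both Pythons build this expression)
def pvPairs (x : List Int) : PySem.Set (List Int) :=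
  PySem.Set.ofList (PySem.List.combinations x 2)

-- helper get_combinations; `batch_size.toNat`: Python raises ValueError for batch_size < 0 (outside Pre_)
def get_combinations (my_list : List Int) (batch_size : Int) :
    PySem.Set (List Int) × List (List Int) :=
  (PySem.Set.ofList (PySem.List.combinations my_list 2),
   PySem.List.combinations my_list batch_size.toNat)

-- the sort key: len(set(itertools.combinations(x, 2)) & two_item_combinations)
def pvAKey (rem : PySem.Set (List Int)) (x : List Int) : Int :=
  ((PySem.Set.inter (pvPairs x) rem).length : Int)

-- the `for combination in …: if …: append/subtract/break` body; returns the chosen tuple and the new pair set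
def pvAFind (rem : PySem.Set (List Int)) :
    List (List Int) → Option (List Int × PySem.Set (List Int))
  | [] => none
  | c :: rest =>
    let sub := pvPairs c
    if PySem.Set.inter sub rem ≠ [] then some (c, PySem.Set.diff rem sub)
    else pvAFind rem rest

-- the while-loop; fuel = |two_item_combinations| + 1 suffices wherever Python terminates (each pass
-- that appends removes ≥ 1 pair); on the `none` branch Python re-sorts and loops forever (outside Pre_)
def pvALoop : Nat → PySem.Set (List Int) → List (List Int) → List (List Int) → List (List Int)
  | 0, _, _, acc => acc
  | fuel+1, rem, lst, acc =>
    if rem = [] then acc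
    else
      let lst' := PySem.List.sorted lst (pvAKey rem) true
      match pvAFind rem lst' with
      | some (c, rem') => pvALoop fuel rem' lst' (acc ++ [c])
      | none => pvALoop fuel rem lst' acc

def get_new_combinations (my_list : List Int) (batch_size : Int) : List (List Int) :=
  let tb := get_combinations my_list batch_size
  pvALoop (tb.1.length + 1) tb.1 tb.2 []

-- ===== PORT B =====
-- one pass over batches: on a batch's first occurrence, record its pair count (every pair of a
-- batch is initially uncovered, so counts[b] starts at len(_pairs(b))) and index its pairs
def pvIndexStep (cc : PySem.Dict (List Int) Int × PySem.Dict (List Int) (List (List Int)))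
    (b : List Int) : PySem.Dict (List Int) Int × PySem.Dict (List Int) (List (List Int)) :=
  if cc.1.contains b then cc
  else
    let ps := pvPairs b
    (cc.1.insert b ((ps.length : Int)),
     ps.foldl (fun d p => d.insert p (d.getD p [] ++ [b])) cc.2)

def pvIndex (batches : List (List Int)) :
    PySem.Dict (List Int) Int × PySem.Dict (List Int) (List (List Int)) :=
  batches.foldl pvIndexStep (PySem.Dict.empty, PySem.Dict.empty)

-- for p in removed: for c in covering[p]: counts[c] -= 1   (every touched key is present in Python's
-- dicts on all reachable states: c ∈ uniq and p is a pair of some batch, so getD/modify are exact here)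
def pvDecrement (covering : PySem.Dict (List Int) (List (List Int)))
    (removed : PySem.Set (List Int)) (counts : PySem.Dict (List Int) Int) :
    PySem.Dict (List Int) Int :=
  removed.foldl
    (fun cn p => (covering.getD p []).foldl (fun cn c => cn.modify c 0 (fun v => v - 1)) cn)
    counts

-- Source B's `for b in batches: if counts[b]: … break`
def pvBFind (covering : PySem.Dict (List Int) (List (List Int)))
    (counts : PySem.Dict (List Int) Int) (rem : PySem.Set (List Int)) :
    List (List Int) → Option (List Int × PySem.Set (List Int) × PySem.Dict (List Int) Int)
  | [] => none
  | b :: rest =>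
    if counts.getD b 0 ≠ 0 then
      let removed := PySem.Set.inter (pvPairs b) rem
      some (b, PySem.Set.diff rem removed, pvDecrement covering removed counts)
    else pvBFind covering counts rem rest

def pvBLoop (covering : PySem.Dict (List Int) (List (List Int))) :
    Nat → PySem.Set (List Int) → PySem.Dict (List Int) Int →
    List (List Int) → List (List Int) → List (List Int)
  | 0, _, _, _, acc => acc
  | fuel+1, rem, counts, lst, acc =>
    if rem = [] then acc
    else
      let lst' := PySem.List.sorted lst (fun b => counts.getD b 0) true
      match pvBFind covering counts rem lst' with
      | some (b, rem', counts') => pvBLoop covering fuel rem' counts' lst' (acc ++ [b])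
      | none => pvBLoop covering fuel rem counts lst' acc

def get_new_combinations_alt (my_list : List Int) (batch_size : Int) : List (List Int) :=
  let rem0 := PySem.Set.ofList (PySem.List.combinations my_list 2)
  let batches := PySem.List.combinations my_list batch_size.toNat
  let cc := pvIndex batches
  pvBLoop cc.2 (rem0.length + 1) rem0 cc.1 batches []

-- ===== PRECONDITION & SPEC =====
-- Pre_ excludes exactly the inputs where Python A does not return: batch_size < 0 (ValueError from
-- itertools.combinations) and lists with ≥ 2 elements whose batch_size is < 2 or > len(my_list)
-- (no batch can ever cover a remaining pair, so the while-loop never terminates).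
def Pre_get_new_combinations (my_list : List Int) (batch_size : Int) : Prop :=
  0 ≤ batch_size ∧ (my_list.length < 2 ∨ (2 ≤ batch_size ∧ batch_size ≤ my_list.length))
instance (my_list : List Int) (batch_size : Int) : Decidable (Pre_get_new_combinations my_list batch_size) := by unfold Pre_get_new_combinations; infer_instance

def pvWitness_get_new_combinations : List Int × Int := ([1, 2, 3, 4], 2)

def Spec_get_new_combinations (my_list : List Int) (batch_size : Int) (out : List (List Int)) : Prop := out = get_new_combinations_alt my_list batch_size
instance (my_list : List Int) (batch_size : Int) (out : List (List Int)) : Decidable (Spec_get_new_combinations my_list batch_size out) := by unfold Spec_get_new_combinations; infer_instance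

-- ===== CLAIM (what is proved, stated in full; the proofs are below) =====
def Claim_equal_get_new_combinations : Prop := ∀ (my_list : List Int) (batch_size : Int), Dom_get_new_combinations my_list batch_size → Pre_get_new_combinations my_list batch_size → Spec_get_new_combinations my_list batch_size (get_new_combinations my_list batch_size)

-- ===== LEMMAS AND PROOFS =====

-- insertBy consults its predicate only on (inserted element, member of the list)
lemma pv_insertBy_congr (p q : List Int → List Int → Bool) (x : List Int) :
    ∀ ys : List (List Int), (∀ y ∈ ys, p x y = q x y) →
      PySem.List.insertBy p x ys = PySem.List.insertBy q x ys := by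
  intro ys h
  induction ys with
  | nil => rfl
  | cons y ys ih =>
    simp only [PySem.List.insertBy, h y (List.mem_cons_self ..)]
    split
    · rfl
    · rw [ih (fun z hz => h z (List.mem_cons_of_mem _ hz))]

lemma pv_sorted_rev_congr (xs : List (List Int)) (k1 k2 : List Int → Int)
    (h : ∀ x ∈ xs, k1 x = k2 x) :
    PySem.List.sorted xs k1 true = PySem.List.sorted xs k2 true := by
  rw [PySem.List.sorted_rev_eq_foldl_insertBy, PySem.List.sorted_rev_eq_foldl_insertBy]
  have aux : ∀ (l : List (List Int)) (acc : List (List Int)),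
      (∀ x ∈ l, k1 x = k2 x) → (∀ y ∈ acc, k1 y = k2 y) →
      l.foldl (fun acc x => PySem.List.insertBy (fun a b => decide (k1 b < k1 a)) x acc) acc
        = l.foldl (fun acc x => PySem.List.insertBy (fun a b => decide (k2 b < k2 a)) x acc) acc := by
    intro l
    induction l with
    | nil => intro acc _ _; rfl
    | cons x l ih =>
      intro acc hl hacc
      simp only [List.foldl_cons]
      rw [pv_insertBy_congr (fun a b => decide (k1 b < k1 a)) (fun a b => decide (k2 b < k2 a)) x acc
          (fun y hy => by simp only [hl x (List.mem_cons_self ..), hacc y hy])]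
      exact ih _ (fun z hz => hl z (List.mem_cons_of_mem _ hz))
        (fun y hy => by
          rcases (PySem.List.mem_insertBy _ _ _ _).1 hy with rfl | hy'
          · exact hl y (List.mem_cons_self ..)
          · exact hacc y hy')
  exact aux xs [] h (by simp)

-- a pass of `counts[c] -= 1` over a list subtracts its multiplicity
lemma pv_getD_modify_sub_fold (l : List (List Int)) :
    ∀ (d : PySem.Dict (List Int) Int) (v : List Int),
      (l.foldl (fun d c => d.modify c 0 (fun z => z - 1)) d).getD v 0
        = d.getD v 0 - (l.count v : Int) := by
  induction l with
  | nil => intro d v; simp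
  | cons c l ih =>
    intro d v
    simp only [List.foldl_cons, ih, PySem.Dict.getD_modify, List.count_cons]
    by_cases hvc : v = c
    · simp [hvc]; ring
    · simp [hvc, beq_iff_eq, Ne.symm hvc]

lemma pv_count_filter (u : List (List Int)) (hnd : u.Nodup) (v : List Int) (hv : v ∈ u)
    (q : List Int → Bool) :
    (u.filter q).count v = if q v then 1 else 0 := by
  by_cases hq : q v
  · simp only [hq, if_true]
    exact List.count_eq_one_of_mem (hnd.filter q) (List.mem_filter.2 ⟨hv, hq⟩)
  · simp only [hq, Bool.false_eq_true, if_false]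
    exact List.count_eq_zero_of_not_mem (fun hmem => hq (List.mem_filter.1 hmem).2)

-- the covering index: entry of a pair p lists exactly the uniq batches whose pair set contains p
lemma pv_covering_inner (b : List Int) (l : List (List Int)) (hl : l.Nodup) :
    ∀ (d : PySem.Dict (List Int) (List (List Int))) (p : List Int),
      (l.foldl (fun d p => d.insert p (d.getD p [] ++ [b])) d).getD p []
        = d.getD p [] ++ (if p ∈ l then [b] else []) := by
  induction l with
  | nil => intro d p; simp
  | cons x l ih =>
    intro d p
    have hx : x ∉ l := (List.nodup_cons.1 hl).1
    simp only [List.foldl_cons, ih (List.nodup_cons.1 hl).2, PySem.Dict.getD_insert]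
    by_cases hpx : p = x
    · subst hpx; simp [hx]
    · simp [hpx, List.mem_cons]

-- the distinct batches in first-occurrence order that the one-pass index processes
def pvFresh (seen : List (List Int)) : List (List Int) → List (List Int)
  | [] => []
  | b :: rest => if b ∈ seen then pvFresh seen rest else b :: pvFresh (b :: seen) rest

lemma pv_mem_fresh (x : List Int) : ∀ (L seen : List (List Int)),
    x ∈ pvFresh seen L ↔ x ∈ L ∧ x ∉ seen := by
  intro L
  induction L with
  | nil => intro seen; simp [pvFresh]
  | cons b rest ih =>
    intro seen
    by_cases hb : b ∈ seen
    · simp only [pvFresh, if_pos hb, ih, List.mem_cons]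
      constructor
      · rintro ⟨h1, h2⟩; exact ⟨Or.inr h1, h2⟩
      · rintro ⟨h1 | h1, h2⟩
        · exact absurd (h1 ▸ hb) h2
        · exact ⟨h1, h2⟩
    · simp only [pvFresh, if_neg hb, List.mem_cons, ih]
      constructor
      · rintro (rfl | ⟨h1, h2⟩)
        · exact ⟨Or.inl rfl, hb⟩
        · exact ⟨Or.inr h1, fun hx => h2 (by simp [hx])⟩
      · rintro ⟨rfl | h1, h2⟩
        · exact Or.inl rfl
        · by_cases hxb : x = b
          · exact Or.inl hxb
          · exact Or.inr ⟨h1, by simp [hxb, h2]⟩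

lemma pv_fresh_nodup : ∀ (L seen : List (List Int)), (pvFresh seen L).Nodup := by
  intro L
  induction L with
  | nil => intro seen; simp [pvFresh]
  | cons b rest ih =>
    intro seen
    by_cases hb : b ∈ seen
    · simpa [pvFresh, hb] using ih seen
    · simp only [pvFresh, if_neg hb, List.nodup_cons]
      exact ⟨fun hmem => by simp [pv_mem_fresh] at hmem, ih (b :: seen)⟩

-- what the one-pass loop leaves in counts and covering
lemma pv_index_spec : ∀ (L : List (List Int))
    (c0 : PySem.Dict (List Int) Int) (d0 : PySem.Dict (List Int) (List (List Int)))
    (seen : List (List Int)),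
    (∀ b : List Int, c0.contains b = decide (b ∈ seen)) →
    (∀ v : List Int, (L.foldl pvIndexStep (c0, d0)).1.getD v 0
        = if v ∈ pvFresh seen L then ((pvPairs v).length : Int) else c0.getD v 0)
    ∧ (∀ p : List Int, (L.foldl pvIndexStep (c0, d0)).2.getD p []
        = d0.getD p [] ++ (pvFresh seen L).filter (fun b => decide (p ∈ pvPairs b))) := by
  intro L
  induction L with
  | nil => intro c0 d0 seen _; exact ⟨fun v => by simp [pvFresh], fun p => by simp [pvFresh]⟩
  | cons b rest ih =>
    intro c0 d0 seen hkeys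
    by_cases hb : b ∈ seen
    · have hcb : c0.contains b = true := by simp [hkeys, hb]
      have hstep : pvIndexStep (c0, d0) b = (c0, d0) := by simp [pvIndexStep, hcb]
      have := ih c0 d0 seen hkeys
      simp only [List.foldl_cons, hstep, pvFresh, if_pos hb]
      exact this
    · have hcb : c0.contains b = false := by simp [hkeys, hb]
      have hstep : pvIndexStep (c0, d0) b
          = (c0.insert b ((pvPairs b).length : Int),
             (pvPairs b).foldl (fun d p => d.insert p (d.getD p [] ++ [b])) d0) := by
        simp [pvIndexStep, hcb]
      have hkeys' : ∀ b' : List Int,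
          (c0.insert b ((pvPairs b).length : Int)).contains b' = decide (b' ∈ b :: seen) := by
        intro b'
        rw [PySem.Dict.contains_insert]
        by_cases hb' : b' = b <;> simp [hb', hkeys]
      obtain ⟨ihc, ihd⟩ := ih (c0.insert b ((pvPairs b).length : Int))
        ((pvPairs b).foldl (fun d p => d.insert p (d.getD p [] ++ [b])) d0) (b :: seen) hkeys'
      constructor
      · intro v
        simp only [List.foldl_cons, hstep, ihc, pvFresh, if_neg hb, List.mem_cons,
          PySem.Dict.getD_insert]
        by_cases h1 : v ∈ pvFresh (b :: seen) rest
        · simp [h1]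
        · by_cases h2 : v = b <;> simp [h1, h2]
      · intro p
        simp only [List.foldl_cons, hstep, ihd,
          pv_covering_inner b (pvPairs b) (PySem.Set.nodup_ofList _) d0 p, pvFresh, if_neg hb,
          List.filter_cons]
        by_cases hp : p ∈ pvPairs b <;> simp [hp]

-- every pair of a batch is a pair of my_list, so a batch's initial coverage is its full pair set
lemma pv_inter_pairs_full (xs : List Int) (r : Nat) (v : List Int)
    (hv : v ∈ PySem.List.combinations xs r) :
    PySem.Set.inter (pvPairs v) (PySem.Set.ofList (PySem.List.combinations xs 2)) = pvPairs v := by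
  unfold PySem.Set.inter
  apply List.filter_eq_self.2
  intro p hp
  have hpv : p ∈ PySem.List.combinations v 2 := by
    simpa [pvPairs, PySem.Set.mem_ofList] using hp
  obtain ⟨hsub, hlen⟩ := (PySem.List.mem_combinations_iff v 2 p).1 hpv
  have hvxs : v.Sublist xs := PySem.List.sublist_of_mem_combinations hv
  have : p ∈ PySem.List.combinations xs 2 :=
    (PySem.List.mem_combinations_iff xs 2 p).2 ⟨hsub.trans hvxs, hlen⟩
  simp [PySem.Set.contains, PySem.Set.mem_ofList, this]

lemma pv_getD_decrement (uniq : List (List Int)) (cov : PySem.Dict (List Int) (List (List Int)))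
    (hndu : uniq.Nodup)
    (hcov : ∀ p, cov.getD p [] = uniq.filter (fun b => decide (p ∈ pvPairs b)))
    (v : List Int) (hv : v ∈ uniq) :
    ∀ (removed : List (List Int)) (counts : PySem.Dict (List Int) Int),
      (pvDecrement cov removed counts).getD v 0
        = counts.getD v 0 - ((removed.filter (fun p => decide (p ∈ pvPairs v))).length : Int) := by
  intro removed
  induction removed with
  | nil => intro counts; simp [pvDecrement]
  | cons p rest ih =>
    intro counts
    have hstep : (pvDecrement cov (p :: rest) counts)
        = pvDecrement cov rest ((cov.getD p []).foldl (fun cn c => cn.modify c 0 (fun v => v - 1)) counts) := rfl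
    rw [hstep, ih, pv_getD_modify_sub_fold, hcov p, pv_count_filter uniq hndu v hv, List.filter_cons]
    by_cases hp : p ∈ pvPairs v
    · simp [hp]; ring
    · simp [hp]

-- |s ∩ t| is symmetric for duplicate-free lists
lemma pv_inter_length_comm (s t : List (List Int)) (hs : s.Nodup) (ht : t.Nodup) :
    (PySem.Set.inter s t).length = (PySem.Set.inter t s).length := by
  have h1 : (PySem.Set.inter s t).toFinset = s.toFinset ∩ t.toFinset := by
    ext x; simp [PySem.Set.mem_inter]
  have h2 : (PySem.Set.inter t s).toFinset = t.toFinset ∩ s.toFinset := by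
    ext x; simp [PySem.Set.mem_inter]
  rw [← List.toFinset_card_of_nodup (PySem.Set.nodup_inter s t hs),
    ← List.toFinset_card_of_nodup (PySem.Set.nodup_inter t s ht), h1, h2, Finset.inter_comm]

-- splitting a filter by a removed subset
lemma pv_filter_split (rem removed rem' : List (List Int))
    (hsub : ∀ x ∈ removed, x ∈ rem)
    (h' : ∀ x, x ∈ rem' ↔ x ∈ rem ∧ x ∉ removed) :
    ∀ P : List (List Int),
      (P.filter (fun x => decide (x ∈ rem))).length
        = (P.filter (fun x => decide (x ∈ removed))).length
          + (P.filter (fun x => decide (x ∈ rem'))).length := by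
  intro P
  induction P with
  | nil => simp
  | cons x P ih =>
    simp only [List.filter_cons]
    by_cases h1 : x ∈ removed
    · have h2 : x ∈ rem := hsub x h1
      have h3 : x ∉ rem' := fun hx => ((h' x).1 hx).2 h1
      simp [h1, h2, h3, ih]; omega
    · by_cases h2 : x ∈ rem
      · have h3 : x ∈ rem' := (h' x).2 ⟨h2, h1⟩
        simp [h1, h2, h3, ih]; omega
      · have h3 : x ∉ rem' := fun hx => h2 ((h' x).1 hx).1
        simp [h1, h2, h3, ih]

lemma pv_diff_inter (s t : List (List Int)) :
    PySem.Set.diff s (PySem.Set.inter t s) = PySem.Set.diff s t := by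
  unfold PySem.Set.diff
  apply List.filter_congr
  intro x hx
  simp [PySem.Set.contains, PySem.Set.inter, List.mem_filter, hx]

-- an intersection's length as a filter with a decidable-membership predicate
lemma pv_len_inter_eq (s t : List (List Int)) :
    (PySem.Set.inter s t).length = (s.filter (fun x => decide (x ∈ t))).length := by
  unfold PySem.Set.inter
  congr 1
  apply List.filter_congr
  intro x _
  simp [PySem.Set.contains]

-- both scans choose the same element and produce the same new pair set
lemma pv_find_eq (rem : PySem.Set (List Int)) (counts : PySem.Dict (List Int) Int)
    (cov : PySem.Dict (List Int) (List (List Int))) :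
    ∀ L : List (List Int),
      (∀ b ∈ L, counts.getD b 0 = ((PySem.Set.inter (pvPairs b) rem).length : Int)) →
      (pvAFind rem L = none ∧ pvBFind cov counts rem L = none) ∨
      ∃ b ∈ L,
        pvAFind rem L = some (b, PySem.Set.diff rem (PySem.Set.inter (pvPairs b) rem)) ∧
        pvBFind cov counts rem L
          = some (b, PySem.Set.diff rem (PySem.Set.inter (pvPairs b) rem),
                  pvDecrement cov (PySem.Set.inter (pvPairs b) rem) counts) := by
  intro L
  induction L with
  | nil => intro _; exact Or.inl ⟨rfl, rfl⟩
  | cons b rest ih =>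
    intro hc
    have hb := hc b (List.mem_cons_self ..)
    by_cases hcond : PySem.Set.inter (pvPairs b) rem = []
    · have hz : counts.getD b 0 = 0 := by rw [hb, hcond]; rfl
      have ha : pvAFind rem (b :: rest) = pvAFind rem rest := by
        simp [pvAFind, hcond]
      have hbf : pvBFind cov counts rem (b :: rest) = pvBFind cov counts rem rest := by
        simp [pvBFind, hz]
      rw [ha, hbf]
      rcases ih (fun x hx => hc x (List.mem_cons_of_mem _ hx)) with hnone | ⟨b', hb', h1, h2⟩
      · exact Or.inl hnone
      · exact Or.inr ⟨b', List.mem_cons_of_mem _ hb', h1, h2⟩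
    · have hz : counts.getD b 0 ≠ 0 := by
        rw [hb]
        simpa using fun h => hcond (List.length_eq_zero_iff.1 h)
      refine Or.inr ⟨b, List.mem_cons_self .., ?_, ?_⟩
      · simp [pvAFind, hcond, (pv_diff_inter rem (pvPairs b)).symm]
      · simp [pvBFind, hz]

lemma pv_loop_eq (uniq : List (List Int)) (cov : PySem.Dict (List Int) (List (List Int)))
    (hndu : uniq.Nodup)
    (hcov : ∀ p, cov.getD p [] = uniq.filter (fun b => decide (p ∈ pvPairs b))) :
    ∀ (fuel : Nat) (rem : PySem.Set (List Int)) (counts : PySem.Dict (List Int) Int)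
      (lst acc : List (List Int)),
      rem.Nodup →
      (∀ b ∈ lst, b ∈ uniq) →
      (∀ b ∈ lst, counts.getD b 0 = ((PySem.Set.inter (pvPairs b) rem).length : Int)) →
      pvALoop fuel rem lst acc = pvBLoop cov fuel rem counts lst acc := by
  intro fuel
  induction fuel with
  | zero => intro rem counts lst acc _ _ _; rfl
  | succ fuel ih =>
    intro rem counts lst acc hrnd hl hc
    by_cases hrem : rem = []
    · simp [pvALoop, pvBLoop, hrem]
    · have hsort : PySem.List.sorted lst (fun b => counts.getD b 0) true
          = PySem.List.sorted lst (pvAKey rem) true :=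
        pv_sorted_rev_congr lst _ _ (fun x hx => (hc x hx).symm ▸ rfl)
      have hl' : ∀ b ∈ PySem.List.sorted lst (pvAKey rem) true, b ∈ uniq :=
        fun b hbmem => hl b ((PySem.List.mem_sorted ..).1 hbmem)
      have hc' : ∀ b ∈ PySem.List.sorted lst (pvAKey rem) true,
          counts.getD b 0 = ((PySem.Set.inter (pvPairs b) rem).length : Int) :=
        fun b hbmem => hc b ((PySem.List.mem_sorted ..).1 hbmem)
      rcases pv_find_eq rem counts cov _ hc' with ⟨han, hbn⟩ | ⟨b, hbmem, ha, hbf⟩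
      · simp only [pvALoop, pvBLoop, if_neg hrem, hsort, han, hbn]
        exact ih rem counts _ acc hrnd hl' hc'
      · simp only [pvALoop, pvBLoop, if_neg hrem, hsort, ha, hbf]
        have hremoved_nd : (PySem.Set.inter (pvPairs b) rem).Nodup :=
          PySem.Set.nodup_inter _ _ (PySem.Set.nodup_ofList _)
        refine ih _ _ _ _ ?_ hl' ?_
        · exact PySem.Set.nodup_diff rem _ hrnd
        · intro b' hb'
          rw [pv_getD_decrement uniq cov hndu hcov b' (hl' b' hb'), hc' b' hb']
          have hsplit := pv_filter_split rem (PySem.Set.inter (pvPairs b) rem)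
            (PySem.Set.diff rem (PySem.Set.inter (pvPairs b) rem))
            (fun x hx => ((PySem.Set.mem_inter _ _ _).1 hx).2)
            (fun x => PySem.Set.mem_diff _ _ _)
            (pvPairs b')
          have hcomm : ((pvPairs b').filter (fun x => decide (x ∈ PySem.Set.inter (pvPairs b) rem))).length
              = ((PySem.Set.inter (pvPairs b) rem).filter (fun p => decide (p ∈ pvPairs b'))).length := by
            rw [← pv_len_inter_eq, ← pv_len_inter_eq]
            exact pv_inter_length_comm _ _ (PySem.Set.nodup_ofList _) hremoved_nd
          rw [pv_len_inter_eq, pv_len_inter_eq, hsplit, hcomm]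
          push_cast
          ring

-- ===== VERDICT (by name: the statement is the Claim_ definition above) =====
theorem get_new_combinations_spec : Claim_equal_get_new_combinations := by
  intro my_list batch_size _ _
  unfold Spec_get_new_combinations get_new_combinations get_new_combinations_alt get_combinations
    pvIndex
  have hspec := pv_index_spec (PySem.List.combinations my_list batch_size.toNat)
    PySem.Dict.empty PySem.Dict.empty []
    (fun b => by simp [PySem.Dict.contains_empty])
  exact pv_loop_eq (pvFresh [] (PySem.List.combinations my_list batch_size.toNat)) _
    (pv_fresh_nodup _ [])
    (fun p => by rw [hspec.2 p]; simp)
    _ _ _ _ _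
    (PySem.Set.nodup_ofList _)
    (fun b hb => (pv_mem_fresh b _ []).2 ⟨hb, by simp⟩)
    (fun b hb => by
      rw [hspec.1 b, if_pos ((pv_mem_fresh b _ []).2 ⟨hb, by simp⟩),
        pv_inter_pairs_full my_list batch_size.toNat b hb])
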